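-- pv_equiv track=rewrite | github.com/matthewcordaro/leet-code-python | finished/201-500/334. Increasing Triplet Subsequence/increasing-triplet-subseq.py | increasingTripletSubarray
-- ===== SOURCE A (Python) =====
-- def increasingTripletSubarray(nums: [int]) -> bool:
--     if len(nums) < 3:
--         return False
--     last_ok = nums[0] < nums[1]
--     last_num = nums[1]
--     for num in nums[2:]:
--         if last_ok:
--             if last_num < num:
--                 return True
--         last_ok = last_num < num
--         last_num = num
--     return False
-- ===== SOURCE B (Python) =====
-- def increasingTripletSubarray(nums: [int]) -> bool:
--     # Run-length reduction: track the length of the current strictly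
--     # increasing run of adjacent elements and the best run length seen;
--     # a consecutive increasing triplet exists iff some run reaches 3.
--     best = cur = 1
--     for a, b in zip(nums, nums[1:]):
--         cur = cur + 1 if a < b else 1
--         best = max(best, cur)
--     return best >= 3
-- ===== Notes on version B (the rewrite author's own statement) =====
-- stated objective: alternative
-- what changed: Replaced A's boolean-state early-return scan (carrying last_ok/last_num) with a run-length reduction: B computes the longest strictly increasing run of adjacent elements and returns whether it reaches length 3.
import Mathlib
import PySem

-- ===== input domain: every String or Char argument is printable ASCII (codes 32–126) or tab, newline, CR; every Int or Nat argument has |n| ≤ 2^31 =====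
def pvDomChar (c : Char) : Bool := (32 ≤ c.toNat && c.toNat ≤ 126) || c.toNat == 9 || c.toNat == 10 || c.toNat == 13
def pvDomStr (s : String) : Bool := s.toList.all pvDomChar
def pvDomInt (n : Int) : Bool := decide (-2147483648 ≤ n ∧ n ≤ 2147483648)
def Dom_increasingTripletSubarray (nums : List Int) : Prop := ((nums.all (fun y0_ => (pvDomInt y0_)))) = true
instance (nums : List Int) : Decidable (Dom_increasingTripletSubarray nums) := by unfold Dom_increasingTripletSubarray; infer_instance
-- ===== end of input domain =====

-- B replaces A's boolean-state early-return scan (last_ok/last_num) by a run-length reduction: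
-- it computes the longest strictly increasing run of adjacent elements and checks whether it reaches 3 (alternative, same cost).
-- ===== PORT A =====
-- A: early-return loop carrying last_ok / last_num over nums[2:]
def pvLoopA (last_ok : Bool) (last_num : Int) : List Int → Bool
  | [] => false
  | num :: rest =>
    if last_ok && decide (last_num < num) then true
    else pvLoopA (decide (last_num < num)) num rest

def increasingTripletSubarray (nums : List Int) : Bool :=
  match nums with
  | n0 :: n1 :: rest => pvLoopA (decide (n0 < n1)) n1 rest
  | _ => false  -- len(nums) < 3

-- ===== PORT B =====
-- B: fold over adjacent pairs carrying (best, cur) run lengths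
def pvStep (p : Int × Int) (ab : Int × Int) : Int × Int :=
  let cur := if ab.1 < ab.2 then p.2 + 1 else 1
  (max p.1 cur, cur)

def increasingTripletSubarray_alt (nums : List Int) : Bool :=
  let r := (nums.zip nums.tail).foldl pvStep (1, 1)
  decide (3 ≤ r.1)

-- ===== PRECONDITION & SPEC =====
def Spec_increasingTripletSubarray (nums : List Int) (out : Bool) : Prop := out = increasingTripletSubarray_alt nums
instance (nums : List Int) (out : Bool) : Decidable (Spec_increasingTripletSubarray nums out) := by unfold Spec_increasingTripletSubarray; infer_instance

-- ===== CLAIM (what is proved, stated in full; the proofs are below) =====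
def Claim_equal_increasingTripletSubarray : Prop := ∀ (nums : List Int), Dom_increasingTripletSubarray nums → Spec_increasingTripletSubarray nums (increasingTripletSubarray nums)

-- ===== LEMMAS AND PROOFS =====
-- once the best run length has reached 3, the fold keeps it ≥ 3
theorem pvStep_mono (ps : List (Int × Int)) : ∀ (p : Int × Int), 3 ≤ p.1 → 3 ≤ (ps.foldl pvStep p).1 := by
  induction ps with
  | nil => intro p h; exact h
  | cons ab t ih =>
    intro p h
    exact ih _ (le_trans h (le_max_left _ _))

-- loop invariant: 1 ≤ cur, A's flag equals (2 ≤ cur), and no run has reached 3 yet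
theorem pvLoopA_eq_fold (rest : List Int) : ∀ (b best cur : Int) (ok : Bool),
    1 ≤ cur → ok = decide (2 ≤ cur) → best < 3 →
    pvLoopA ok b rest =
      decide (3 ≤ (((b :: rest).zip (b :: rest).tail).foldl pvStep (best, cur)).1) := by
  induction rest with
  | nil =>
    intro b best cur ok _ _ hbest
    simp [pvLoopA]
    omega
  | cons num r ih =>
    intro b best cur ok hcur hok hbest
    have hz : ((b :: num :: r).zip (b :: num :: r).tail).foldl pvStep (best, cur)
        = (((num :: r).zip (num :: r).tail).foldl pvStep (pvStep (best, cur) (b, num))) := by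
      simp [List.zip]
    rw [hz]
    by_cases hbn : b < num
    · by_cases h2 : (2 : Int) ≤ cur
      · -- A returns true; B's run reaches ≥ 3 and stays there
        have : pvLoopA ok b (num :: r) = true := by
          simp [pvLoopA, hok, h2, hbn]
        rw [this]
        have h3 : 3 ≤ (pvStep (best, cur) (b, num)).1 := by
          simp [pvStep, hbn]
          omega
        exact (decide_eq_true (pvStep_mono _ _ h3)).symm
      · -- ok is false, cur = 1; run becomes 2
        have hc1 : cur = 1 := by omega
        have hstep : pvStep (best, cur) (b, num) = (max best 2, 2) := by
          simp [pvStep, hbn, hc1]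
        have hA : pvLoopA ok b (num :: r) = pvLoopA (decide (b < num)) num r := by
          simp [pvLoopA, hok, h2]
        rw [hA, hstep]
        have := ih num (max best 2) 2 (decide (b < num)) (by omega)
          (by simp [hbn]) (by omega)
        exact this
    · -- not increasing: run resets to 1
      have hstep : pvStep (best, cur) (b, num) = (max best 1, 1) := by
        simp [pvStep, hbn]
      have hA : pvLoopA ok b (num :: r) = pvLoopA (decide (b < num)) num r := by
        simp [pvLoopA, hbn]
      rw [hA, hstep]
      exact ih num (max best 1) 1 (decide (b < num)) (by omega)
        (by simp [hbn]) (by omega)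

-- ===== VERDICT (by name: the statement is the Claim_ definition above) =====
theorem increasingTripletSubarray_spec : Claim_equal_increasingTripletSubarray := by
  intro nums _
  unfold Spec_increasingTripletSubarray
  match nums with
  | [] => rfl
  | [a] => rfl
  | a :: b :: rest =>
    show pvLoopA (decide (a < b)) b rest = increasingTripletSubarray_alt (a :: b :: rest)
    simp only [increasingTripletSubarray_alt]
    have hz : ((a :: b :: rest).zip (a :: b :: rest).tail).foldl pvStep (1, 1)
        = ((b :: rest).zip (b :: rest).tail).foldl pvStep (pvStep (1, 1) (a, b)) := by
      simp [List.zip]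
    rw [hz]
    by_cases hab : a < b
    · have hstep : pvStep ((1 : Int), (1 : Int)) (a, b) = (2, 2) := by
        simp [pvStep, hab]
      rw [hstep]
      exact pvLoopA_eq_fold rest b 2 2 _ (by omega) (by simp [hab]) (by omega)
    · have hstep : pvStep ((1 : Int), (1 : Int)) (a, b) = (1, 1) := by
        simp [pvStep, hab]
      rw [hstep]
      exact pvLoopA_eq_fold rest b 1 1 _ (by omega) (by simp [hab]) (by omega)
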